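-- pv_equiv track=rewrite | github.com/flagnohed/lhutils | lhutils.py | wstext2int
-- ===== SOURCE A (Python) =====
-- def wstext2int(s: str) -> str:
--     i1: int = 0
--     i2: int = 0
--     begun: bool = False
--     for i in range(len(s)):
--         if not begun and (s[i] == '(' or s[i].isdigit()):
--             # Indicate that we are looking for the end of the expression
--             # (i.e. closed parenthesis or digit)
--             begun = True
--             i1 = i
--
--         elif begun and (s[i] in ['\n', '\t'] or \
--             i + 1 < len(s) and s[i] == s[i + 1] == ' '):
--             i2 = i
--             break
--
--     return s[i1:i2]
-- ===== SOURCE B (Python) =====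
-- def wstext2int(s: str) -> str:
--     """Return the text from the first '(' or digit up to (excluding) the next
--     newline, tab or double space; '' when either delimiter is absent."""
--     i1 = next((i for i, c in enumerate(s) if c == '(' or c.isdigit()), None)
--     if i1 is None:
--         return ''
--     ends = [j for j in (s.find('\n', i1 + 1), s.find('\t', i1 + 1),
--                         s.find('  ', i1 + 1)) if j != -1]
--     if not ends:
--         return ''
--     return s[i1:min(ends)]
-- ===== Notes on version B (the rewrite author's own statement) =====
-- stated objective: simpler
-- what changed: A's single stateful scan with a begun flag and break is replaced by a plain decomposition: locate the first opening-parenthesis-or-digit index with one search, then slice up to the nearest of three library str.find terminators (newline, tab, double space) after it, with an explicit empty result when either delimiter is absent.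
import Mathlib
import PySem

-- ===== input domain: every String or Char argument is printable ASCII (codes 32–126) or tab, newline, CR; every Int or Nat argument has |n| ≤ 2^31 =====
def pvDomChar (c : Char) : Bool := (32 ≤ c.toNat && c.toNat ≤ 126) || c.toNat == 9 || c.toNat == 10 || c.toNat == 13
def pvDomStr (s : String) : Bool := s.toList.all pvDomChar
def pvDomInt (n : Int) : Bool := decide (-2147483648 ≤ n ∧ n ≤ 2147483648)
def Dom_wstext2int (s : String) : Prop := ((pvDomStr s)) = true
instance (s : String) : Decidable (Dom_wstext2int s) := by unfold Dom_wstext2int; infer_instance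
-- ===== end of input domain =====

-- B replaces A's single stateful begun-flag scan-with-break by a plain decomposition:
-- locate the start index, then slice to the nearest of three library `find` terminators,
-- with an explicit empty result when either delimiter is absent (objective: simpler).

-- ===== PORT A =====
-- shared char predicate: Python `c == '(' or c.isdigit()`
def wstext2intStart (c : Char) : Bool := c == '(' || PySem.Chars.isdigit c

-- literal port of A's for-loop with its (i1, i2, begun) state and break;
-- `cs.getD (i+1) ' '` is only reached under the guard `i+1 < cs.length`, exactly like
-- Python's short-circuited `i + 1 < len(s) and s[i] == s[i + 1] == ' '`.
def wstext2intLoop (cs : List Char) (i i1 i2 : Nat) (begun : Bool) : Nat × Nat :=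
  if h : i < cs.length then
    if !begun && wstext2intStart cs[i] then
      wstext2intLoop cs (i+1) i i2 true
    else if begun && ((cs[i] == '\n' || cs[i] == '\t') ||
        (decide (i+1 < cs.length) && cs[i] == ' ' && cs.getD (i+1) ' ' == ' ')) then
      (i1, i)
    else
      wstext2intLoop cs (i+1) i1 i2 begun
  else (i1, i2)
termination_by cs.length - i

def wstext2int (s : String) : String :=
  let p := wstext2intLoop s.toList 0 0 0 false
  PySem.Str.slice s (some (p.1 : Int)) (some (p.2 : Int))

-- ===== PORT B =====
def wstext2int_alt (s : String) : String :=
  match s.toList.findIdx? wstext2intStart with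
  | none => ""
  | some i1 =>
    let ends := ([PySem.Str.findFrom s "\n" ((i1 : Int) + 1),
                  PySem.Str.findFrom s "\t" ((i1 : Int) + 1),
                  PySem.Str.findFrom s "  " ((i1 : Int) + 1)]).filter (fun j => j != -1)
    match PySem.List.min? ends (fun j => j) with
    | none => ""
    | some m => PySem.Str.slice s (some (i1 : Int)) (some m)

-- ===== PRECONDITION & SPEC =====
def Spec_wstext2int (s : String) (out : String) : Prop := out = wstext2int_alt s
instance (s : String) (out : String) : Decidable (Spec_wstext2int s out) := by unfold Spec_wstext2int; infer_instance

-- ===== CLAIM (what is proved, stated in full; the proofs are below) =====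
def Claim_equal_wstext2int : Prop := ∀ (s : String), Dom_wstext2int s → Spec_wstext2int s (wstext2int s)

-- ===== LEMMAS AND PROOFS =====

-- "r is the first index ≥ k satisfying P, coded as an Int with -1 for none"
def IsFirst (k : Nat) (P : Nat → Prop) (r : Int) : Prop :=
  (r = -1 ∧ ∀ j, k ≤ j → ¬ P j) ∨
  (0 ≤ r ∧ k ≤ r.toNat ∧ P r.toNat ∧ ∀ j, k ≤ j → j < r.toNat → ¬ P j)

-- the nearest of several "find" results, -1 meaning "absent" (proof-side only)
def minpos (a b : Int) : Int :=
  if a = -1 then b else if b = -1 then a else min a b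

-- the terminator condition of both programs, by disjunct
def TermNl (cs : List Char) (j : Nat) : Prop := j < cs.length ∧ cs.getD j ' ' = '\n'
def TermTab (cs : List Char) (j : Nat) : Prop := j < cs.length ∧ cs.getD j ' ' = '\t'
def TermSp (cs : List Char) (j : Nat) : Prop :=
  j + 1 < cs.length ∧ cs.getD j 'x' = ' ' ∧ cs.getD (j+1) 'x' = ' '
def TermP (cs : List Char) (j : Nat) : Prop :=
  (TermNl cs j ∨ TermTab cs j) ∨ TermSp cs j

theorem isFirst_minpos {k : Nat} {P Q : Nat → Prop} {a b : Int}
    (ha : IsFirst k P a) (hb : IsFirst k Q b) :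
    IsFirst k (fun j => P j ∨ Q j) (minpos a b) := by
  unfold minpos
  rcases ha with ⟨ha1, ha2⟩ | ⟨ha1, ha2, ha3, ha4⟩ <;>
    rcases hb with ⟨hb1, hb2⟩ | ⟨hb1, hb2, hb3, hb4⟩
  · simp only [ha1]
    exact Or.inl ⟨hb1, fun j hj => by simp [ha2 j hj, hb2 j hj]⟩
  · simp only [ha1]
    exact Or.inr ⟨hb1, hb2, Or.inr hb3, fun j hj hj' => by simp [ha2 j hj, hb4 j hj hj']⟩
  · rw [if_neg (by omega), if_pos hb1]
    exact Or.inr ⟨ha1, ha2, Or.inl ha3, fun j hj hj' => by simp [hb2 j hj, ha4 j hj hj']⟩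
  · rw [if_neg (by omega), if_neg (by omega)]
    rcases le_total a b with h | h
    · rw [min_eq_left h]
      exact Or.inr ⟨ha1, ha2, Or.inl ha3,
        fun j hj hj' h => h.elim (ha4 j hj hj') (hb4 j hj (by omega))⟩
    · rw [min_eq_right h]
      exact Or.inr ⟨hb1, hb2, Or.inr hb3,
        fun j hj hj' h => h.elim (ha4 j hj (by omega)) (hb4 j hj hj')⟩

-- B's "filter the -1s away, take the min of the survivors" equals the nested minpos
theorem filter_min3 (a b c : Int)
    (ha : a = -1 ∨ 0 ≤ a) (hb : b = -1 ∨ 0 ≤ b) (hc : c = -1 ∨ 0 ≤ c) :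
    PySem.List.min? (([a, b, c]).filter (fun j => j != -1)) (fun j => j) =
      (if minpos (minpos a b) c = -1 then none else some (minpos (minpos a b) c)) := by
  have ne : ∀ x : Int, 0 ≤ x → (x != -1) = true := by intro x hx; simp; omega
  rcases ha with ha | ha <;> rcases hb with hb | hb <;> rcases hc with hc | hc <;>
    subst_vars <;>
    simp_all [ne, List.filter_cons, List.filter_nil, minpos, PySem.List.min?_id_cons]

-- A's elif condition, read back as TermP
theorem termP_iff (cs : List Char) (i : Nat) (h : i < cs.length) :
    TermP cs i ↔ ((cs[i] == '\n' || cs[i] == '\t') ||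
        (decide (i+1 < cs.length) && cs[i] == ' ' && cs.getD (i+1) ' ' == ' ')) = true := by
  unfold TermP TermNl TermTab TermSp
  by_cases h2 : i + 1 < cs.length
  · simp [h, h2, List.getD]
  · simp [h, h2, List.getD]

theorem termP_lt {cs : List Char} {j : Nat} (h : TermP cs j) : j < cs.length := by
  rcases h with (⟨h, _⟩ | ⟨h, _⟩) | ⟨h, _⟩ <;> omega

-- A's loop after `begun` is set: it returns i1 and the first terminator index (or i2)
theorem loop2_fuel (cs : List Char) : ∀ n i i1 i2 (r : Int), cs.length - i ≤ n →
    IsFirst i (TermP cs) r →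
    wstext2intLoop cs i i1 i2 true = (i1, if 0 ≤ r then r.toNat else i2) := by
  intro n
  induction n with
  | zero =>
    intro i i1 i2 r hn hf
    have hi : ¬ i < cs.length := by omega
    rw [wstext2intLoop, dif_neg hi]
    rcases hf with ⟨h1, _⟩ | ⟨h1, h2, h3, _⟩
    · rw [h1]; simp
    · exact absurd (termP_lt h3) (by omega)
  | succ n ih =>
    intro i i1 i2 r hn hf
    by_cases hi : i < cs.length
    · rw [wstext2intLoop, dif_pos hi]
      simp only [Bool.not_true, Bool.false_and, if_neg (by simp : ¬ (false = true)),
        Bool.true_and]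
      by_cases hc : TermP cs i
      · rw [if_pos ((termP_iff cs i hi).mp hc)]
        rcases hf with ⟨h1, h2⟩ | ⟨h1, h2, h3, h4⟩
        · exact absurd hc (h2 i le_rfl)
        · have : r.toNat = i := by
            by_contra hne
            exact (h4 i le_rfl (by omega)) hc
          rw [if_pos h1, this]
      · rw [if_neg (fun h => hc ((termP_iff cs i hi).mpr h))]
        apply ih _ _ _ _ (by omega)
        rcases hf with ⟨h1, h2⟩ | ⟨h1, h2, h3, h4⟩
        · exact Or.inl ⟨h1, fun j hj => h2 j (by omega)⟩
        · refine Or.inr ⟨h1, ?_, h3, fun j hj hj' => h4 j (by omega) hj'⟩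
          rcases Nat.lt_or_ge i r.toNat with h | h
          · omega
          · have : r.toNat = i := by omega
            exact absurd (this ▸ h3) hc
    · rw [wstext2intLoop, dif_neg hi]
      rcases hf with ⟨h1, _⟩ | ⟨h1, h2, h3, _⟩
      · rw [h1]; simp
      · exact absurd (termP_lt h3) (by omega)

theorem loop2_eq (cs : List Char) (i i1 i2 : Nat) (r : Int) (hf : IsFirst i (TermP cs) r) :
    wstext2intLoop cs i i1 i2 true = (i1, if 0 ≤ r then r.toNat else i2) :=
  loop2_fuel cs (cs.length - i) i i1 i2 r le_rfl hf

-- A's loop before `begun` is set: it scans for the first start character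
theorem loop1_fuel (cs : List Char) : ∀ n i i1 i2, cs.length - i ≤ n →
    wstext2intLoop cs i i1 i2 false =
      match (cs.drop i).findIdx? wstext2intStart with
      | none => (i1, i2)
      | some d => wstext2intLoop cs (i + d + 1) (i + d) i2 true := by
  intro n
  induction n with
  | zero =>
    intro i i1 i2 hn
    have hi : ¬ i < cs.length := by omega
    rw [wstext2intLoop, dif_neg hi, List.drop_eq_nil_of_le (by omega)]
    simp [List.findIdx?_nil]
  | succ n ih =>
    intro i i1 i2 hn
    by_cases hi : i < cs.length
    · rw [wstext2intLoop, dif_pos hi,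
        show cs.drop i = cs[i] :: cs.drop (i+1) from (List.getElem_cons_drop hi).symm,
        List.findIdx?_cons]
      by_cases hs : wstext2intStart cs[i] = true
      · simp only [Bool.not_false, Bool.true_and, if_pos hs]
        simp
      · simp only [Bool.not_false, Bool.true_and, if_neg hs, Bool.false_and,
          if_neg (by simp : ¬ (false = true))]
        rw [ih (i+1) i1 i2 (by omega)]
        rcases h : (cs.drop (i+1)).findIdx? wstext2intStart with _ | d
        · simp
        · simp only [Option.map_some]
          rw [show i + (d + 1) + 1 = i + 1 + d + 1 by omega,
            show i + (d + 1) = i + 1 + d by omega]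
    · rw [wstext2intLoop, dif_neg hi, List.drop_eq_nil_of_le (by omega)]
      simp [List.findIdx?_nil]

-- each str.find(sub, k) is the first index ≥ k where sub occurs
theorem isFirst_findFrom (cs sub : List Char) (k : Nat) (hk : k ≤ cs.length)
    (P : Nat → Prop) (hP : ∀ j, (sub <+: cs.drop j) ↔ P j) :
    IsFirst k P (PySem.Chars.findFrom cs sub (k : Int) none) := by
  by_cases h : PySem.Chars.findFrom cs sub (k : Int) none = -1
  · refine Or.inl ⟨h, fun j hj hPj => ?_⟩
    have h2 := (PySem.Chars.findFrom_natCast_eq_neg_one_iff cs sub k hk).mp h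
    have h3 : sub <+: (cs.drop k).drop (j - k) := by
      rw [List.drop_drop, show k + (j - k) = j by omega]; exact (hP j).mpr hPj
    exact h2 (h3.isInfix.trans ((List.drop_suffix _ _).isInfix))
  · obtain ⟨h1, h2, h3⟩ := PySem.Chars.findFrom_natCast_spec cs sub k hk h
    exact Or.inr ⟨le_trans (by exact_mod_cast Nat.zero_le k) h1, by omega, (hP _).mp h2,
      fun j hj hj' hPj => h3 j hj hj' ((hP j).mpr hPj)⟩

theorem prefix_singleton (l : List Char) (a : Char) : [a] <+: l ↔ l[0]? = some a := by
  cases l with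
  | nil => simp
  | cons x xs => simp [List.cons_prefix_cons, eq_comm]

theorem prefix_pair (l : List Char) (a b : Char) :
    [a, b] <+: l ↔ l[0]? = some a ∧ l[1]? = some b := by
  match l with
  | [] => simp
  | [x] => simp [List.cons_prefix_cons]
  | x :: y :: xs => simp [List.cons_prefix_cons, eq_comm]

theorem getElem?_eq_iff_getD (cs : List Char) (j : Nat) (a d : Char) :
    cs[j]? = some a ↔ (j < cs.length ∧ cs.getD j d = a) := by
  constructor
  · intro h
    have hl : j < cs.length := by
      by_contra hl
      simp [List.getElem?_eq_none_iff.mpr (by omega : cs.length ≤ j)] at h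
    refine ⟨hl, ?_⟩
    rw [List.getD_eq_getElem?_getD, h]; rfl
  · rintro ⟨hl, hd⟩
    rw [List.getElem?_eq_getElem hl, List.getD_eq_getElem _ _ hl] at *
    rw [hd]

theorem prefix_nl (cs : List Char) (j : Nat) : ['\n'] <+: cs.drop j ↔ TermNl cs j := by
  rw [prefix_singleton, List.getElem?_drop]
  simpa using getElem?_eq_iff_getD cs j '\n' ' '

theorem prefix_tab (cs : List Char) (j : Nat) : ['\t'] <+: cs.drop j ↔ TermTab cs j := by
  rw [prefix_singleton, List.getElem?_drop]
  simpa using getElem?_eq_iff_getD cs j '\t' ' '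

theorem prefix_sp (cs : List Char) (j : Nat) : [' ', ' '] <+: cs.drop j ↔ TermSp cs j := by
  rw [prefix_pair, List.getElem?_drop, List.getElem?_drop, show j + 0 = j from rfl,
    getElem?_eq_iff_getD cs j ' ' 'x', getElem?_eq_iff_getD cs (j+1) ' ' 'x']
  unfold TermSp
  constructor
  · rintro ⟨⟨h1, h2⟩, h3, h4⟩; exact ⟨by omega, h2, h4⟩
  · rintro ⟨h1, h2, h3⟩; exact ⟨⟨by omega, h2⟩, by omega, h3⟩

-- Python s[i1:0] with 0 ≤ i1 is ''
theorem slice_to_zero (s : String) (i1 : Nat) :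
    PySem.Str.slice s (some (i1 : Int)) (some 0) = "" := by
  simp [PySem.Str.slice, PySem.List.slice]

-- ===== VERDICT (by name: the statement is the Claim_ definition above) =====
theorem wstext2int_spec : Claim_equal_wstext2int := by
  intro s _
  unfold Spec_wstext2int wstext2int wstext2int_alt
  rw [loop1_fuel s.toList s.toList.length 0 0 0 (by omega), List.drop_zero]
  rcases hidx : s.toList.findIdx? wstext2intStart with _ | i1
  · simp [PySem.Str.slice, PySem.List.slice_to]
  · simp only [Nat.zero_add]
    have hlt : i1 < s.toList.length := by
      have := List.findIdx?_eq_some_iff_findIdx_eq.mp hidx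
      omega
    have hk : i1 + 1 ≤ s.toList.length := by omega
    have e : ((i1 : Int) + 1) = ((i1 + 1 : Nat) : Int) := by push_cast; ring
    have enl : PySem.Str.findFrom s "\n" ((i1 : Int) + 1) =
        PySem.Chars.findFrom s.toList ['\n'] ((i1 + 1 : Nat) : Int) none := by
      rw [PySem.Str.findFrom_eq, show ("\n".toList) = ['\n'] from rfl, e]
    have etab : PySem.Str.findFrom s "\t" ((i1 : Int) + 1) =
        PySem.Chars.findFrom s.toList ['\t'] ((i1 + 1 : Nat) : Int) none := by
      rw [PySem.Str.findFrom_eq, show ("\t".toList) = ['\t'] from rfl, e]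
    have esp : PySem.Str.findFrom s "  " ((i1 : Int) + 1) =
        PySem.Chars.findFrom s.toList [' ', ' '] ((i1 + 1 : Nat) : Int) none := by
      rw [PySem.Str.findFrom_eq, show ("  ".toList) = [' ', ' '] from rfl, e]
    have hnl := isFirst_findFrom s.toList ['\n'] (i1+1) hk _ (prefix_nl s.toList)
    have htab := isFirst_findFrom s.toList ['\t'] (i1+1) hk _ (prefix_tab s.toList)
    have hsp := isFirst_findFrom s.toList [' ', ' '] (i1+1) hk _ (prefix_sp s.toList)
    have hnl' : IsFirst (i1+1) (TermNl s.toList) (PySem.Str.findFrom s "\n" ((i1 : Int) + 1)) := by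
      rw [enl]; exact hnl
    have htab' : IsFirst (i1+1) (TermTab s.toList) (PySem.Str.findFrom s "\t" ((i1 : Int) + 1)) := by
      rw [etab]; exact htab
    have hsp' : IsFirst (i1+1) (TermSp s.toList) (PySem.Str.findFrom s "  " ((i1 : Int) + 1)) := by
      rw [esp]; exact hsp
    have shape : ∀ {k : Nat} {P : Nat → Prop} {r : Int}, IsFirst k P r → r = -1 ∨ 0 ≤ r := by
      rintro k P r (⟨h, _⟩ | ⟨h, _⟩)
      · exact Or.inl h
      · exact Or.inr h
    -- the combined minimum is the first terminator index ≥ i1+1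
    have hf : IsFirst (i1 + 1) (TermP s.toList)
        (minpos (minpos (PySem.Str.findFrom s "\n" ((i1 : Int) + 1))
                        (PySem.Str.findFrom s "\t" ((i1 : Int) + 1)))
                (PySem.Str.findFrom s "  " ((i1 : Int) + 1))) := by
      unfold TermP
      exact isFirst_minpos (isFirst_minpos hnl' htab') hsp'
    rw [loop2_eq s.toList (i1+1) i1 0 _ hf,
      filter_min3 _ _ _ (shape hnl') (shape htab') (shape hsp')]
    obtain ⟨q, hq⟩ : ∃ q, minpos (minpos (PySem.Str.findFrom s "\n" ((i1 : Int) + 1))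
        (PySem.Str.findFrom s "\t" ((i1 : Int) + 1)))
        (PySem.Str.findFrom s "  " ((i1 : Int) + 1)) = q := ⟨_, rfl⟩
    rw [hq] at hf ⊢
    rcases shape hf with h | h
    · subst h
      norm_num
      simpa using slice_to_zero s i1
    · rw [if_pos h, if_neg (show ¬ q = -1 by omega)]
      have hcast : ((q.toNat : Nat) : Int) = q := by omega
      rw [hcast]
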